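-- pv_equiv track=rewrite | github.com/Realdog4/Hillel_Homework_Python | Homework_19/main.py | find_deepest_lake_depth
-- ===== SOURCE A (Python) =====
-- def find_deepest_lake_depth(heights):
--     left = 0
--     left_peak = heights[left]
--     right = len(heights) - 1
--     right_peak = heights[right]
--     deepest = 0
--
--     while left < right:
--         if left_peak < right_peak:
--             left += 1
--             deepest = max(deepest, left_peak - heights[left])
--             left_peak = max(left_peak, heights[left])
--         else:
--             right -= 1
--             deepest = max(deepest, right_peak - heights[right])
--             right_peak = max(right_peak, heights[right])
--
--     return deepest
-- ===== SOURCE B (Python) =====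
-- def find_deepest_lake_depth(heights):
--     run = heights[0]
--     left_max = []
--     for h in heights:
--         run = max(run, h)
--         left_max.append(run)
--     run = heights[-1]
--     right_max = []
--     for h in reversed(heights):
--         run = max(run, h)
--         right_max.append(run)
--     right_max.reverse()
--     deepest = 0
--     for h, lm, rm in zip(heights, left_max, right_max):
--         deepest = max(deepest, min(lm, rm) - h)
--     return deepest
-- ===== Notes on version B (the rewrite author's own statement) =====
-- stated objective: alternative
-- what changed: Replaces the two-pointer convergence with stateful peak juggling by two linear prefix/suffix running-max passes plus one final zip scan taking min(left_max,right_max)-height per index.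
import Mathlib
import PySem

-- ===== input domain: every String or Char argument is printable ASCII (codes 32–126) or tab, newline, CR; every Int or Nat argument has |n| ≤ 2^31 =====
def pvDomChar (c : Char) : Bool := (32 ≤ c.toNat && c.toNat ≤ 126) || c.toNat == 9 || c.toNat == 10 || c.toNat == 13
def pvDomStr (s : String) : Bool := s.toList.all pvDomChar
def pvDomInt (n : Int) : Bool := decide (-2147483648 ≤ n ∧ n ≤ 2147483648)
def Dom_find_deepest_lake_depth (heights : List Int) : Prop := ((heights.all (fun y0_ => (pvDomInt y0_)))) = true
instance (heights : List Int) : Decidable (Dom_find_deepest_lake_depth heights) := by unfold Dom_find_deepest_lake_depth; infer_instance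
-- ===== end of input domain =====

-- B replaces A's two-pointer peak tracking by prefix/suffix running-max passes and a final min(left_max,right_max)-height scan; alternative, not faster.

-- ===== PORT A =====
-- the while loop; heights[left]/heights[right] stay in range on nonempty input (Pre_), so getD is exact there
def pvGoA (hs : List Int) (left right : Nat) (lp rp d : Int) : Int :=
  if left < right then
    if lp < rp then
      pvGoA hs (left + 1) right (max lp (hs.getD (left + 1) 0)) rp (max d (lp - hs.getD (left + 1) 0))
    else
      pvGoA hs left (right - 1) lp (max rp (hs.getD (right - 1) 0)) (max d (rp - hs.getD (right - 1) 0))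
  else d
termination_by right - left
decreasing_by all_goals omega

def find_deepest_lake_depth (heights : List Int) : Int :=
  -- heights[0] / heights[len-1]: IndexError on [] (excluded by Pre_); getD is exact on nonempty input
  pvGoA heights 0 (heights.length - 1) (heights.getD 0 0) (heights.getD (heights.length - 1) 0) 0

-- ===== PORT B =====
def find_deepest_lake_depth_alt (heights : List Int) : Int :=
  -- heights[0] / heights[-1]: IndexError on [] (excluded by Pre_); getD is exact on nonempty input
  let step := fun (acc : List Int × Int) (h : Int) => (acc.1 ++ [max acc.2 h], max acc.2 h)
  let left_max := (heights.foldl step ([], heights.getD 0 0)).1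
  let right_max := ((heights.reverse.foldl step ([], heights.getD (heights.length - 1) 0)).1).reverse
  (heights.zip (left_max.zip right_max)).foldl
    (fun deepest p => max deepest (min p.2.1 p.2.2 - p.1)) 0

-- ===== PRECONDITION & SPEC =====
-- Pre_ excludes only the empty list, on which A raises IndexError (it reads heights[0] before the loop)
def Pre_find_deepest_lake_depth (heights : List Int) : Prop := heights ≠ []
instance (heights : List Int) : Decidable (Pre_find_deepest_lake_depth heights) := by unfold Pre_find_deepest_lake_depth; infer_instance
def pvWitness_find_deepest_lake_depth : List Int := [2, 0, 3]

def Spec_find_deepest_lake_depth (heights : List Int) (out : Int) : Prop := out = find_deepest_lake_depth_alt heights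
instance (heights : List Int) (out : Int) : Decidable (Spec_find_deepest_lake_depth heights out) := by unfold Spec_find_deepest_lake_depth; infer_instance

-- ===== CLAIM (what is proved, stated in full; the proofs are below) =====
def Claim_equal_find_deepest_lake_depth : Prop := ∀ (heights : List Int), Dom_find_deepest_lake_depth heights → Pre_find_deepest_lake_depth heights → Spec_find_deepest_lake_depth heights (find_deepest_lake_depth heights)

-- ===== LEMMAS AND PROOFS =====

-- max of a nonempty list, max of the prefix hs[0..i] and of the suffix hs[i..], and the true per-index depth
def pvMax (xs : List Int) : Int := (PySem.List.max? xs (fun y => y)).getD 0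
def pvMT (hs : List Int) (i : Nat) : Int := pvMax (hs.take (i + 1))
def pvMD (hs : List Int) (i : Nat) : Int := pvMax (hs.drop i)
def pvTV (hs : List Int) (i : Nat) : Int := min (pvMT hs i) (pvMD hs i) - hs.getD i 0

lemma pvMax_cons (x : Int) (t : List Int) : pvMax (x :: t) = t.foldl max x := by
  simp [pvMax, PySem.List.max?_id_cons]

lemma foldl_max_pull (t : List Int) : ∀ (x a : Int), t.foldl max (max x a) = max x (t.foldl max a) := by
  induction t with
  | nil => intro x a; rfl
  | cons b t ih => intro x a; simp only [List.foldl_cons, max_assoc, ih]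

lemma pvMax_cons_ne (x : Int) (t : List Int) (h : t ≠ []) : pvMax (x :: t) = max x (pvMax t) := by
  cases t with
  | nil => exact absurd rfl h
  | cons y s => simp only [pvMax_cons, List.foldl_cons, foldl_max_pull]

lemma pvMax_append_singleton (xs : List Int) (x : Int) (h : xs ≠ []) :
    pvMax (xs ++ [x]) = max (pvMax xs) x := by
  cases xs with
  | nil => exact absurd rfl h
  | cons y s => simp [pvMax_cons, List.foldl_append]

lemma pvMT_zero (hs : List Int) (h : hs ≠ []) : pvMT hs 0 = hs.getD 0 0 := by
  cases hs with
  | nil => exact absurd rfl h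
  | cons y s => simp [pvMT, pvMax_cons]

lemma pvMT_succ (hs : List Int) (i : Nat) (h : i + 1 < hs.length) :
    pvMT hs (i + 1) = max (pvMT hs i) (hs.getD (i + 1) 0) := by
  have ht : hs.take (i + 1 + 1) = hs.take (i + 1) ++ [hs[i+1]] := by
    rw [List.take_add_one, List.getElem?_eq_getElem h]; rfl
  have hne : hs.take (i + 1) ≠ [] := by
    have : (hs.take (i+1)).length = min (i+1) hs.length := List.length_take
    intro hc; rw [hc] at this; simp at this; omega
  rw [pvMT, pvMT, ht, pvMax_append_singleton _ _ hne, List.getD_eq_getElem _ _ h]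

lemma pvMD_last (hs : List Int) (h : hs ≠ []) :
    pvMD hs (hs.length - 1) = hs.getD (hs.length - 1) 0 := by
  have hl : hs.length - 1 < hs.length := by
    cases hs with | nil => exact absurd rfl h | cons a t => simp
  have hd : hs.drop (hs.length - 1) = hs[hs.length - 1] :: hs.drop (hs.length - 1 + 1) :=
    List.drop_eq_getElem_cons hl
  have : hs.drop (hs.length - 1 + 1) = [] := by
    apply List.drop_eq_nil_of_le; omega
  rw [pvMD, hd, this, List.getD_eq_getElem _ _ hl]; simp [pvMax_cons]

lemma pvMD_step (hs : List Int) (r : Nat) (h : r + 1 < hs.length) :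
    pvMD hs r = max (hs.getD r 0) (pvMD hs (r + 1)) := by
  have hr : r < hs.length := by omega
  have hd : hs.drop r = hs[r] :: hs.drop (r + 1) := List.drop_eq_getElem_cons hr
  have hne : hs.drop (r+1) ≠ [] := by
    intro hc
    have := List.drop_eq_nil_iff.mp hc; omega
  rw [pvMD, hd, pvMax_cons_ne _ _ hne, List.getD_eq_getElem _ _ hr]; rfl

lemma pvMD_mono (hs : List Int) (i j : Nat) (hij : i ≤ j) (hj : j < hs.length) :
    pvMD hs j ≤ pvMD hs i := by
  induction j, hij using Nat.le_induction with
  | base => exact le_refl _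
  | succ j hij ih =>
      have hj' : j < hs.length := by omega
      calc pvMD hs (j+1) ≤ max (hs.getD j 0) (pvMD hs (j+1)) := le_max_right _ _
        _ = pvMD hs j := (pvMD_step hs j hj).symm
        _ ≤ pvMD hs i := ih hj'

lemma pvMT_mono (hs : List Int) (i j : Nat) (hij : i ≤ j) (hj : j < hs.length) :
    pvMT hs i ≤ pvMT hs j := by
  induction j, hij using Nat.le_induction with
  | base => exact le_refl _
  | succ j hij ih =>
      have hj' : j < hs.length := by omega
      calc pvMT hs i ≤ pvMT hs j := ih hj'
        _ ≤ max (pvMT hs j) (hs.getD (j+1) 0) := le_max_left _ _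
        _ = pvMT hs (j+1) := (pvMT_succ hs j hj).symm

lemma foldl_max_out (f : Nat → Int) (l : List Nat) : ∀ (d v : Int),
    l.foldl (fun a i => max a (f i)) (max d v) = max (l.foldl (fun a i => max a (f i)) d) v := by
  induction l with
  | nil => intro d v; rfl
  | cons i t ih =>
      intro d v
      simp only [List.foldl_cons]
      rw [max_right_comm, ih]

-- the two-pointer loop invariant: with correct peaks and the boundary debts paid, the loop
-- computes the running max of the true per-index depths over the open interval (l, r)
lemma pvGoA_eq (hs : List Int) : ∀ (k l r : Nat) (d : Int), r - l ≤ k → l ≤ r → r < hs.length → 0 ≤ d →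
    (l = 0 ∨ pvMT hs (l - 1) - hs.getD l 0 ≤ d) →
    (r = hs.length - 1 ∨ pvMD hs (r + 1) - hs.getD r 0 ≤ d) →
    pvGoA hs l r (pvMT hs l) (pvMD hs r) d
      = (List.range' (l + 1) (r - l - 1)).foldl (fun a i => max a (pvTV hs i)) d := by
  intro k
  induction k with
  | zero =>
      intro l r d hk hlr hr hd _ _
      have : l = r := by omega
      subst this
      rw [pvGoA]
      simp
  | succ k ih =>
      intro l r d hk hlr hrn hd hl hr
      by_cases hlt : l < r
      · rw [pvGoA, if_pos hlt]
        have hne : hs ≠ [] := by intro hc; rw [hc] at hrn; simp at hrn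
        by_cases hpk : pvMT hs l < pvMD hs r
        · -- left move
          rw [if_pos hpk]
          have hl1 : l + 1 < hs.length := by omega
          have hmt : max (pvMT hs l) (hs.getD (l+1) 0) = pvMT hs (l+1) := (pvMT_succ hs l hl1).symm
          rw [hmt]
          have hrec := ih (l+1) r (max d (pvMT hs l - hs.getD (l+1) 0)) (by omega) (by omega) hrn
            (le_trans hd (le_max_left _ _))
            (Or.inr (by simp))
            (by rcases hr with h | h; · exact Or.inl h
                · exact Or.inr (le_trans h (le_max_left _ _)))
          rw [hrec]
          by_cases hlr1 : l + 1 = r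
          · -- meeting: both ranges empty; the recorded value is absorbed
            have h1 : r - l - 1 = 0 := by omega
            have h2 : r - (l+1) - 1 = 0 := by omega
            rw [h1, h2]
            simp only [List.range', List.foldl_nil]
            rw [show l + 1 = r from hlr1]
            rcases le_total (hs.getD r 0) (pvMT hs l) with hcase | hcase
            · by_cases hrl : r = hs.length - 1
              · exfalso
                have hml := pvMD_last hs hne
                rw [hrl] at hpk hcase
                rw [hml] at hpk
                omega
              · rcases hr with h | h
                · exact absurd h hrl
                · have hstep : pvMD hs r = max (hs.getD r 0) (pvMD hs (r+1)) :=
                    pvMD_step hs r (by omega)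
                  rcases le_total (hs.getD r 0) (pvMD hs (r+1)) with hc2 | hc2
                  · have : pvMD hs r = pvMD hs (r+1) := by rw [hstep]; exact max_eq_right hc2
                    rw [this] at hpk
                    have : pvMT hs l - hs.getD r 0 ≤ d := by omega
                    exact max_eq_left this
                  · have : pvMD hs r = hs.getD r 0 := by rw [hstep]; exact max_eq_left hc2
                    rw [this] at hpk; omega
            · exact max_eq_left (by omega)
          · -- l + 1 < r : peel the head of the range
            have hcons : List.range' (l+1) (r - l - 1) = (l+1) :: List.range' (l+2) (r - l - 2) := by
              have : r - l - 1 = (r - l - 2) + 1 := by omega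
              rw [this, List.range'_succ]
            rw [hcons]
            simp only [List.foldl_cons]
            have h2 : r - (l+1) - 1 = r - l - 2 := by omega
            rw [h2]
            congr 1
            have hmd : pvMD hs r ≤ pvMD hs (l+1) := pvMD_mono hs (l+1) r (by omega) hrn
            rcases le_total (hs.getD (l+1) 0) (pvMT hs l) with hc | hc
            · have hmt1 : pvMT hs (l+1) = pvMT hs l := by
                rw [pvMT_succ hs l hl1]; exact max_eq_left hc
              have : pvTV hs (l+1) = pvMT hs l - hs.getD (l+1) 0 := by
                rw [pvTV, hmt1, min_eq_left (by omega)]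
              rw [this]
            · have hmt1 : pvMT hs (l+1) = hs.getD (l+1) 0 := by
                rw [pvMT_succ hs l hl1]; exact max_eq_right hc
              have htv : pvTV hs (l+1) ≤ 0 := by
                rw [pvTV, hmt1]
                have : min (hs.getD (l+1) 0) (pvMD hs (l+1)) ≤ hs.getD (l+1) 0 := min_le_left _ _
                omega
              rw [max_eq_left (by omega), max_eq_left (by omega)]
        · -- right move
          rw [if_neg hpk]
          rw [not_lt] at hpk
          have hr1 : r - 1 + 1 = r := by omega
          have hmd : max (pvMD hs r) (hs.getD (r-1) 0) = pvMD hs (r-1) := by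
            rw [pvMD_step hs (r-1) (by omega)]
            rw [hr1, max_comm]
          rw [hmd]
          have hrec := ih l (r-1) (max d (pvMD hs r - hs.getD (r-1) 0)) (by omega) (by omega) (by omega)
            (le_trans hd (le_max_left _ _))
            (by rcases hl with h | h; · exact Or.inl h
                · exact Or.inr (le_trans h (le_max_left _ _)))
            (Or.inr (by rw [hr1]; simp))
          rw [hrec]
          by_cases hlr1 : r - 1 = l
          · have h1 : r - l - 1 = 0 := by omega
            have h2 : (r-1) - l - 1 = 0 := by omega
            rw [h1, h2]
            simp only [List.range', List.foldl_nil]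
            rw [hlr1]
            by_cases hl0 : l = 0
            · subst hl0
              have := pvMT_zero hs hne
              rw [this] at hpk
              exact max_eq_left (by omega)
            · rcases hl with h | h
              · exact absurd h hl0
              · have hls : pvMT hs l = max (pvMT hs (l-1)) (hs.getD l 0) := by
                  have := pvMT_succ hs (l-1) (by omega)
                  rw [show l - 1 + 1 = l by omega] at this
                  exact this
                rcases le_total (hs.getD l 0) (pvMT hs (l-1)) with hc | hc
                · have : pvMT hs l = pvMT hs (l-1) := by rw [hls]; exact max_eq_left hc
                  rw [this] at hpk
                  exact max_eq_left (by omega)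
                · have : pvMT hs l = hs.getD l 0 := by rw [hls]; exact max_eq_right hc
                  rw [this] at hpk
                  exact max_eq_left (by omega)
          · -- l < r - 1 : peel the last element of the range
            have happ : List.range' (l+1) (r - l - 1) = List.range' (l+1) (r - l - 2) ++ [r-1] := by
              have h3 : r - l - 1 = (r - l - 2) + 1 := by omega
              rw [h3, List.range'_1_concat]
              congr 2
              omega
            rw [happ, List.foldl_append]
            simp only [List.foldl_cons, List.foldl_nil]
            have h2 : (r-1) - l - 1 = r - l - 2 := by omega
            rw [h2, foldl_max_out]
            set R := (List.range' (l+1) (r - l - 2)).foldl (fun a i => max a (pvTV hs i)) d with hR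
            have hRd : d ≤ R :=
              (PySem.List.le_foldl_max_int (List.range' (l+1) (r - l - 2)) (pvTV hs) d).1
            have hmtm : pvMT hs l ≤ pvMT hs (r-1) := pvMT_mono hs l (r-1) (by omega) (by omega)
            have hstep : pvMD hs (r-1) = max (hs.getD (r-1) 0) (pvMD hs r) := by
              have := pvMD_step hs (r-1) (by omega)
              rw [hr1] at this; exact this
            rcases le_total (hs.getD (r-1) 0) (pvMD hs r) with hc | hc
            · have hmd1 : pvMD hs (r-1) = pvMD hs r := by rw [hstep]; exact max_eq_right hc
              have : pvTV hs (r-1) = pvMD hs r - hs.getD (r-1) 0 := by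
                rw [pvTV, hmd1, min_eq_right (by omega)]
              rw [this]
            · have hmd1 : pvMD hs (r-1) = hs.getD (r-1) 0 := by rw [hstep]; exact max_eq_left hc
              have htv : pvTV hs (r-1) ≤ 0 := by
                rw [pvTV, hmd1]
                have : min (pvMT hs (r-1)) (hs.getD (r-1) 0) ≤ hs.getD (r-1) 0 := min_le_right _ _
                omega
              rw [max_eq_left (by omega), max_eq_left (by omega)]
      · have : l = r := by omega
        subst this
        rw [pvGoA]
        simp

-- proof-side scan characterisation
def pvScanL (run : Int) : List Int → List Int
  | [] => []
  | h :: t => (max run h) :: pvScanL (max run h) t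

lemma foldl_scan : ∀ (xs acc : List Int) (run : Int),
    xs.foldl (fun (acc : List Int × Int) (h : Int) => (acc.1 ++ [max acc.2 h], max acc.2 h)) (acc, run)
      = (acc ++ pvScanL run xs, xs.foldl max run) := by
  intro xs
  induction xs with
  | nil => intro acc run; simp [pvScanL]
  | cons h t ih => intro acc run; simp [pvScanL, ih]

lemma length_scanL : ∀ (xs : List Int) (run : Int), (pvScanL run xs).length = xs.length := by
  intro xs
  induction xs with
  | nil => intro run; rfl
  | cons h t ih => intro run; simp [pvScanL, ih]

lemma getElem_scanL : ∀ (xs : List Int) (run : Int) (i : Nat) (hi : i < xs.length),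
    (pvScanL run xs)[i]'(by rw [length_scanL]; exact hi) = max run (pvMax (xs.take (i + 1))) := by
  intro xs
  induction xs with
  | nil => intro run i hi; simp at hi
  | cons h t ih =>
      intro run i hi
      cases i with
      | zero => simp [pvScanL, pvMax_cons]
      | succ i =>
          have hi' : i < t.length := by simpa using hi
          have := ih (max run h) i hi'
          simp only [pvScanL, List.getElem_cons_succ]
          rw [this]
          have hne : t.take (i+1) ≠ [] := by
            have : (t.take (i+1)).length = min (i+1) t.length := List.length_take
            intro hc; rw [hc] at this; simp at this; omega
          rw [List.take_succ_cons, pvMax_cons_ne h _ hne, max_assoc]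

lemma foldl_max_reverse : ∀ (t : List Int) (x : Int), t.reverse.foldl max x = t.foldl max x := by
  intro t
  induction t with
  | nil => intro x; rfl
  | cons h s ih =>
      intro x
      simp only [List.reverse_cons, List.foldl_append, List.foldl_cons, List.foldl_nil, ih]
      rw [show max x h = max h x from max_comm x h, foldl_max_pull]
      rw [max_comm]

lemma mem_le_pvMax (xs : List Int) (x : Int) (h : x ∈ xs) : x ≤ pvMax xs := by
  cases xs with
  | nil => simp at h
  | cons y t =>
      rw [pvMax_cons]
      rcases List.mem_cons.mp h with rfl | ht
      · exact (PySem.List.le_foldl_max t x).1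
      · exact (PySem.List.le_foldl_max t y).2 x ht

lemma foldl_max_absorb : ∀ (l : List Int), l ≠ [] → ∀ a, l.foldl max a = max a (pvMax l) := by
  intro l
  induction l with
  | nil => intro h; exact absurd rfl h
  | cons h t ih =>
      intro _ a
      cases t with
      | nil => simp [pvMax_cons]
      | cons y s =>
          rw [List.foldl_cons, ih (by simp), pvMax_cons_ne h _ (by simp), max_assoc]

lemma pvMax_reverse' (xs : List Int) (h : xs ≠ []) : pvMax xs.reverse = pvMax xs := by
  cases xs with
  | nil => exact absurd rfl h
  | cons x t =>
      have h1 : (x :: t).reverse.foldl max x = (x :: t).foldl max x := foldl_max_reverse _ x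
      have h2 : (x :: t).foldl max x = pvMax (x :: t) := by
        rw [List.foldl_cons, max_self, pvMax_cons]
      have h3 : (x :: t).reverse.foldl max x = max x (pvMax (x :: t).reverse) :=
        foldl_max_absorb _ (by simp) x
      have h4 : x ≤ pvMax (x :: t).reverse := mem_le_pvMax _ x (by simp)
      rw [h2, h3] at h1
      rw [← h1, max_eq_right h4]

-- the right_max list, elementwise
lemma rm_elem (hs : List Int) (i : Nat) (hi : i < hs.length) :
    ((pvScanL (hs.getD (hs.length - 1) 0) hs.reverse).reverse)[i]'
        (by rw [List.length_reverse, length_scanL, List.length_reverse]; exact hi) = pvMD hs i := by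
  have hlen : (pvScanL (hs.getD (hs.length - 1) 0) hs.reverse).length = hs.length := by
    rw [length_scanL]; simp
  have hrev : ((pvScanL (hs.getD (hs.length - 1) 0) hs.reverse).reverse)[i]'(by rw [List.length_reverse, hlen]; exact hi)
      = (pvScanL (hs.getD (hs.length - 1) 0) hs.reverse)[(pvScanL (hs.getD (hs.length - 1) 0) hs.reverse).length - 1 - i]'(by omega) := by
    apply List.getElem_reverse
  rw [hrev]
  have hi2 : hs.length - 1 - i < hs.reverse.length := by simp; omega
  have := getElem_scanL hs.reverse (hs.getD (hs.length - 1) 0) (hs.length - 1 - i) hi2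
  simp only [hlen]
  rw [this]
  have htk : hs.reverse.take (hs.length - 1 - i + 1) = (hs.drop (hs.length - (hs.length - 1 - i + 1))).reverse :=
    List.take_reverse
  have he : hs.length - (hs.length - 1 - i + 1) = i := by omega
  rw [htk, he]
  have hdne : hs.drop i ≠ [] := by
    intro hc; have := List.drop_eq_nil_iff.mp hc; omega
  rw [pvMax_reverse' _ hdne]
  have hmem : hs.getD (hs.length - 1) 0 ∈ hs.drop i := by
    rw [List.getD_eq_getElem _ _ (by omega : hs.length - 1 < hs.length)]
    have : hs[hs.length - 1] = (hs.drop i)[hs.length - 1 - i]'(by rw [List.length_drop]; omega) := by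
      rw [List.getElem_drop]
      congr 1
      omega
    rw [this]
    exact List.getElem_mem _
  exact max_eq_right (mem_le_pvMax _ _ hmem)

lemma lm_elem (hs : List Int) (h : hs ≠ []) (i : Nat) (hi : i < hs.length) :
    (pvScanL (hs.getD 0 0) hs)[i]'(by rw [length_scanL]; exact hi) = pvMT hs i := by
  rw [getElem_scanL hs _ i hi]
  have hmem : hs.getD 0 0 ∈ hs.take (i + 1) := by
    cases hs with
    | nil => exact absurd rfl h
    | cons x t => simp [List.take_succ_cons]
  exact max_eq_right (mem_le_pvMax _ _ hmem)

lemma zipfold (hs lm rm : List Int) (hlm : lm.length = hs.length) (hrm : rm.length = hs.length)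
    (hL : ∀ (i : Nat) (h : i < hs.length), lm[i]'(by omega) = pvMT hs i)
    (hR : ∀ (i : Nat) (h : i < hs.length), rm[i]'(by omega) = pvMD hs i) :
    ∀ (m k : Nat) (a : Int), hs.length - k = m → k ≤ hs.length →
    ((hs.drop k).zip ((lm.drop k).zip (rm.drop k))).foldl
        (fun deepest p => max deepest (min p.2.1 p.2.2 - p.1)) a
      = (List.range' k (hs.length - k)).foldl (fun a i => max a (pvTV hs i)) a := by
  intro m
  induction m with
  | zero =>
      intro k a hm hk
      rw [hm, List.drop_eq_nil_of_le (by omega)]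
      simp
  | succ m ih =>
      intro k a hm hk
      have hkl : k < hs.length := by omega
      rw [List.drop_eq_getElem_cons hkl,
          List.drop_eq_getElem_cons (by omega : k < lm.length),
          List.drop_eq_getElem_cons (by omega : k < rm.length),
          List.zip_cons_cons, List.zip_cons_cons, List.foldl_cons]
      rw [hL k hkl, hR k hkl]
      have harg : min (pvMT hs k) (pvMD hs k) - hs[k] = pvTV hs k := by
        rw [pvTV, List.getD_eq_getElem _ _ hkl]
      rw [harg, ih (k+1) (max a (pvTV hs k)) (by omega) (by omega)]
      rw [show hs.length - k = (hs.length - (k + 1)) + 1 by omega, List.range'_succ]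
      simp only [List.foldl_cons]

lemma alt_eq (hs : List Int) (h : hs ≠ []) :
    find_deepest_lake_depth_alt hs
      = (List.range' 0 hs.length).foldl (fun a i => max a (pvTV hs i)) 0 := by
  simp only [find_deepest_lake_depth_alt]
  rw [foldl_scan, foldl_scan]
  simp only [List.nil_append]
  have := zipfold hs (pvScanL (hs.getD 0 0) hs)
      ((pvScanL (hs.getD (hs.length - 1) 0) hs.reverse).reverse)
      (by rw [length_scanL])
      (by rw [List.length_reverse, length_scanL, List.length_reverse])
      (fun i hi => lm_elem hs h i hi)
      (fun i hi => rm_elem hs i hi)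
      hs.length 0 0 (by omega) (by omega)
  simpa using this

lemma pvTV_zero_nonpos (hs : List Int) (h : hs ≠ []) : pvTV hs 0 ≤ 0 := by
  have h1 := pvMT_zero hs h
  have h2 : min (pvMT hs 0) (pvMD hs 0) ≤ pvMT hs 0 := min_le_left _ _
  simp only [pvTV]
  omega

lemma pvTV_last_nonpos (hs : List Int) (h : hs ≠ []) : pvTV hs (hs.length - 1) ≤ 0 := by
  have h1 := pvMD_last hs h
  have h2 : min (pvMT hs (hs.length - 1)) (pvMD hs (hs.length - 1)) ≤ pvMD hs (hs.length - 1) :=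
    min_le_right _ _
  simp only [pvTV]
  omega

-- the first and last per-index depths are never positive, so B's full scan equals A's interior scan
lemma runs_eq (hs : List Int) (h : hs ≠ []) :
    (List.range' 0 hs.length).foldl (fun a i => max a (pvTV hs i)) 0
      = (List.range' 1 (hs.length - 2)).foldl (fun a i => max a (pvTV hs i)) 0 := by
  by_cases h2 : hs.length = 1
  · rw [h2]
    simp [List.range', max_eq_left (pvTV_zero_nonpos hs h)]
  · have hn2 : 2 ≤ hs.length := by
      have := List.length_pos_iff.mpr h
      omega
    have e1 : List.range' 0 hs.length = 0 :: List.range' 1 (hs.length - 1) := by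
      rw [show hs.length = (hs.length - 1) + 1 by omega, List.range'_succ]
      simp
    have e2 : List.range' 1 (hs.length - 1) = List.range' 1 (hs.length - 2) ++ [hs.length - 1] := by
      rw [show hs.length - 1 = (hs.length - 2) + 1 by omega, List.range'_1_concat]
      congr 2
      omega
    rw [e1]
    simp only [List.foldl_cons]
    rw [max_eq_left (pvTV_zero_nonpos hs h), e2, List.foldl_append]
    simp only [List.foldl_cons, List.foldl_nil]
    have hRge : (0:Int) ≤ (List.range' 1 (hs.length - 2)).foldl (fun a i => max a (pvTV hs i)) 0 :=
      (PySem.List.le_foldl_max_int (List.range' 1 (hs.length - 2)) (pvTV hs) 0).1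
    have := pvTV_last_nonpos hs h
    exact max_eq_left (by omega)

-- ===== VERDICT (by name: the statement is the Claim_ definition above) =====
theorem find_deepest_lake_depth_spec : Claim_equal_find_deepest_lake_depth := by
  intro hs _ hpre
  unfold Spec_find_deepest_lake_depth
  have hn : 0 < hs.length := List.length_pos_iff.mpr hpre
  rw [find_deepest_lake_depth, ← pvMT_zero hs hpre, ← pvMD_last hs hpre]
  rw [pvGoA_eq hs hs.length 0 (hs.length - 1) 0 (by omega) (by omega) (by omega) (by omega)
      (Or.inl rfl) (Or.inl rfl)]
  rw [alt_eq hs hpre, runs_eq hs hpre]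
  congr 1
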